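-- pv_equiv track=rewrite | github.com/tetras92/MOMA | CORE/ITOR_XP/GeneratorOfAsetAndOmega_m6.py | check_int_List_1
-- ===== SOURCE A (Python) =====
-- m = 6
--
-- def check_int_List_1(int_List):
--     A_binary_encoding_list = [integer_to_bin(val_int) for val_int in int_List]
--     """significativite des m criteres"""
--     for i in range(m):
--         if all([alt[i] == '0' for alt in A_binary_encoding_list]) or all(
--                 [alt[i] == '1' for alt in A_binary_encoding_list]):
--             return False
--
--     return True
--
-- def integer_to_bin(val_int):
--     return format(val_int, "b").zfill(m)
-- ===== SOURCE B (Python) =====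
-- m = 6
--
-- def integer_to_bin(val_int):
--     return format(val_int, "b").zfill(m)
--
-- def check_int_List_1(int_List):
--     # one pass: collect the set of characters seen at each of the m positions
--     seen = [set() for _ in range(m)]
--     for v in int_List:
--         for chars, c in zip(seen, integer_to_bin(v)):
--             chars.add(c)
--     return not any(chars <= {'0'} or chars <= {'1'} for chars in seen)
-- ===== Notes on version B (the rewrite author's own statement) =====
-- stated objective: alternative
-- what changed: A re-encodes and re-scans the whole list twice per bit position (per-position all() scans); B makes one pass over the list building six per-position sets of seen characters, then checks each set for being a subset of {'0'} or {'1'}.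
import Mathlib
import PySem

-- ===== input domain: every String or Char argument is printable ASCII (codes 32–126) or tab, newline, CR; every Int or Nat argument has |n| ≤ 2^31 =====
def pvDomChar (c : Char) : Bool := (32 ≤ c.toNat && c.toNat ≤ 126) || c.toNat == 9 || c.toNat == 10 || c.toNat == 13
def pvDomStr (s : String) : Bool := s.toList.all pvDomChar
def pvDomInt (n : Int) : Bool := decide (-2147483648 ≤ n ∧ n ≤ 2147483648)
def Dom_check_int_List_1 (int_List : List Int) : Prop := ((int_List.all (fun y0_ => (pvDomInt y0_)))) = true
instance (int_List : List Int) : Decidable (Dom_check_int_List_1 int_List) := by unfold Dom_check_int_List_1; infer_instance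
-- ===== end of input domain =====

-- B replaces A's per-bit-position repeated scans of the list with a single pass that
-- collects the set of characters seen at each of the 6 positions, then checks each set
-- (alternative decomposition, same asymptotic cost).


-- ===== PORT A =====
-- integer_to_bin(val_int) = format(val_int, "b").zfill(6), on the List Char side
def integer_to_bin (val_int : Int) : List Char :=
  PySem.Chars.zfill (PySem.Int.toBinChars val_int) 6

-- the 'for i in range(m): if all(...)==... return False' loop, i drawn from range(6)
def aLoop (enc : List (List Char)) : List Int → Bool
  | [] => true
  | i :: rest =>
    if (enc.map (fun alt => PySem.List.pyGet? alt i == some '0')).all id ||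
       (enc.map (fun alt => PySem.List.pyGet? alt i == some '1')).all id
    then false
    else aLoop enc rest

def check_int_List_1 (int_List : List Int) : Bool :=
  let A_binary_encoding_list := int_List.map integer_to_bin
  aLoop A_binary_encoding_list (PySem.List.pyRange 0 6 1)

-- ===== PORT B =====
def check_int_List_1_alt (int_List : List Int) : Bool :=
  let seen := int_List.foldl
    (fun seen v => List.zipWith PySem.Set.add seen (integer_to_bin v))
    (List.replicate 6 (PySem.Set.empty : PySem.Set Char))
  ! seen.any (fun chars =>
      PySem.Set.issubset chars ['0'] || PySem.Set.issubset chars ['1'])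

-- ===== PRECONDITION & SPEC =====
def Spec_check_int_List_1 (int_List : List Int) (out : Bool) : Prop := out = check_int_List_1_alt int_List
instance (int_List : List Int) (out : Bool) : Decidable (Spec_check_int_List_1 int_List out) := by unfold Spec_check_int_List_1; infer_instance

-- ===== CLAIM (what is proved, stated in full; the proofs are below) =====
def Claim_equal_check_int_List_1 : Prop := ∀ (int_List : List Int), Dom_check_int_List_1 int_List → Spec_check_int_List_1 int_List (check_int_List_1 int_List)

-- ===== LEMMAS AND PROOFS =====

-- every encoded string has length ≥ 6
lemma length_integer_to_bin (v : Int) : 6 ≤ (integer_to_bin v).length := by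
  simp [integer_to_bin, PySem.Chars.length_zfill]

-- the fold preserves the accumulator's length when every string is at least as long
lemma foldl_zipWith_length (enc : List (List Char)) (acc : List (PySem.Set Char))
    (h : ∀ s ∈ enc, acc.length ≤ s.length) :
    (enc.foldl (fun seen s => List.zipWith PySem.Set.add seen s) acc).length = acc.length := by
  induction enc generalizing acc with
  | nil => rfl
  | cons s rest ih =>
    have hlen : (List.zipWith PySem.Set.add acc s).length = acc.length := by
      have := h s (by simp)
      rw [List.length_zipWith]; omega
    rw [List.foldl_cons, ih _ (by intro t ht; rw [hlen]; exact h t (by simp [ht])), hlen]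

-- membership in the j-th set after the fold
lemma foldl_zipWith_mem (enc : List (List Char)) (acc : List (PySem.Set Char))
    (h : ∀ s ∈ enc, acc.length ≤ s.length) (j : Nat) (hj : j < acc.length) (x : Char) :
    x ∈ ((enc.foldl (fun seen s => List.zipWith PySem.Set.add seen s) acc)[j]?.getD []) ↔
      x ∈ (acc[j]?.getD []) ∨ ∃ s ∈ enc, s[j]? = some x := by
  induction enc generalizing acc with
  | nil => simp
  | cons s rest ih =>
    have hs : acc.length ≤ s.length := h s (by simp)
    have hlen : (List.zipWith PySem.Set.add acc s).length = acc.length := by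
      rw [List.length_zipWith]; omega
    have hj' : j < (List.zipWith PySem.Set.add acc s).length := by rw [hlen]; exact hj
    rw [List.foldl_cons,
      ih (List.zipWith PySem.Set.add acc s) (by intro t ht; rw [hlen]; exact h t (by simp [ht])) hj']
    have hjs : j < s.length := lt_of_lt_of_le hj hs
    have hz : (List.zipWith PySem.Set.add acc s)[j]?.getD [] = PySem.Set.add (acc[j]?.getD []) s[j] := by
      rw [List.getElem?_eq_getElem hj', List.getElem?_eq_getElem hj]
      simp [List.getElem_zipWith]
    rw [hz, PySem.Set.mem_add]
    constructor
    · rintro (⟨ha | hx⟩ | ⟨t, ht, hx⟩)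
      · exact Or.inl ha
      · exact Or.inr ⟨s, by simp, by simp [hx, List.getElem?_eq_getElem hjs]⟩
      · exact Or.inr ⟨t, by simp [ht], hx⟩
    · rintro (ha | ⟨t, ht, hx⟩)
      · exact Or.inl (Or.inl ha)
      · rcases List.mem_cons.mp ht with rfl | ht'
        · refine Or.inl (Or.inr ?_)
          rw [List.getElem?_eq_getElem hjs] at hx
          exact (Option.some.inj hx).symm
        · exact Or.inr ⟨t, ht', hx⟩

-- per-position bridge: A's all() scan over the list ≡ B's subset test on the seen set
lemma cond_bridge (int_List : List Int) (j : Nat) (hj : j < 6) (c : Char) :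
    ((int_List.map integer_to_bin).map
        (fun alt => PySem.List.pyGet? alt (j : Int) == some c)).all id = true ↔
      PySem.Set.issubset
        ((int_List.foldl (fun seen v => List.zipWith PySem.Set.add seen (integer_to_bin v))
          (List.replicate 6 (PySem.Set.empty : PySem.Set Char)))[j]?.getD []) [c] = true := by
  have hmap : int_List.foldl (fun seen v => List.zipWith PySem.Set.add seen (integer_to_bin v))
      (List.replicate 6 (PySem.Set.empty : PySem.Set Char))
      = (int_List.map integer_to_bin).foldl (fun seen s => List.zipWith PySem.Set.add seen s)
        (List.replicate 6 (PySem.Set.empty : PySem.Set Char)) := by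
    rw [List.foldl_map]
  have hlenc : ∀ s ∈ int_List.map integer_to_bin,
      (List.replicate 6 (PySem.Set.empty : PySem.Set Char)).length ≤ s.length := by
    intro s hs
    rcases List.mem_map.mp hs with ⟨v, _, rfl⟩
    simpa using length_integer_to_bin v
  have hj6 : j < (List.replicate 6 (PySem.Set.empty : PySem.Set Char)).length := by simpa using hj
  have hacc : ((List.replicate 6 (PySem.Set.empty : PySem.Set Char))[j]?.getD []) = [] := by
    interval_cases j <;> rfl
  rw [hmap, PySem.Set.issubset_iff]
  constructor
  · intro hall x hx
    rw [foldl_zipWith_mem _ _ hlenc j hj6 x, hacc] at hx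
    rcases hx with h' | ⟨s, hs, hsx⟩
    · simp at h'
    · rcases List.mem_map.mp hs with ⟨v, hv, rfl⟩
      have hmem : (PySem.List.pyGet? (integer_to_bin v) (j : Int) == some c) ∈
          ((int_List.map integer_to_bin).map
            (fun alt => PySem.List.pyGet? alt (j : Int) == some c)) :=
        List.mem_map_of_mem (List.mem_map_of_mem hv)
      have hb := List.all_eq_true.mp hall _ hmem
      have hjs : j < (integer_to_bin v).length := lt_of_lt_of_le hj (length_integer_to_bin v)
      rw [id, PySem.List.pyGet?_natCast, List.getElem?_eq_getElem hjs] at hb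
      rw [List.getElem?_eq_getElem hjs] at hsx
      simp at hb hsx
      simp [← hsx, hb]
  · intro hsub
    rw [List.all_eq_true]
    intro b hb
    rcases List.mem_map.mp hb with ⟨s, hs, rfl⟩
    rcases List.mem_map.mp hs with ⟨v, hv, rfl⟩
    have hjs : j < (integer_to_bin v).length := lt_of_lt_of_le hj (length_integer_to_bin v)
    have hx : (integer_to_bin v)[j] ∈ (((int_List.map integer_to_bin).foldl
        (fun seen s => List.zipWith PySem.Set.add seen s)
        (List.replicate 6 (PySem.Set.empty : PySem.Set Char)))[j]?.getD []) := by
      rw [foldl_zipWith_mem _ _ hlenc j hj6]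
      exact Or.inr ⟨integer_to_bin v, List.mem_map.mpr ⟨v, hv, rfl⟩,
        List.getElem?_eq_getElem hjs⟩
    have := hsub _ hx
    simp at this
    simp [id, PySem.List.pyGet?_natCast, List.getElem?_eq_getElem hjs, this]

-- ===== VERDICT (by name: the statement is the Claim_ definition above) =====
set_option maxHeartbeats 1000000 in
theorem check_int_List_1_spec : Claim_equal_check_int_List_1 := by
  intro int_List _
  unfold Spec_check_int_List_1 check_int_List_1 check_int_List_1_alt
  set seen := int_List.foldl
    (fun seen v => List.zipWith PySem.Set.add seen (integer_to_bin v))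
    (List.replicate 6 (PySem.Set.empty : PySem.Set Char)) with hseen
  have hlenc : ∀ s ∈ int_List.map integer_to_bin,
      (List.replicate 6 (PySem.Set.empty : PySem.Set Char)).length ≤ s.length := by
    intro s hs
    rcases List.mem_map.mp hs with ⟨v, _, rfl⟩
    simpa using length_integer_to_bin v
  have hlen : seen.length = 6 := by
    rw [hseen, ← List.foldl_map (f := integer_to_bin)
      (g := fun seen s => List.zipWith PySem.Set.add seen s),
      foldl_zipWith_length _ _ hlenc]
    simp
  have hrange : PySem.List.pyRange 0 6 1 = ([0, 1, 2, 3, 4, 5] : List Int) := by decide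
  rw [hrange]
  have key : ∀ j : Nat, j < 6 →
      (((int_List.map integer_to_bin).map
          (fun alt => PySem.List.pyGet? alt (j : Int) == some '0')).all id ||
       ((int_List.map integer_to_bin).map
          (fun alt => PySem.List.pyGet? alt (j : Int) == some '1')).all id) =
      (PySem.Set.issubset (seen[j]?.getD []) ['0'] ||
       PySem.Set.issubset (seen[j]?.getD []) ['1']) := by
    intro j hj
    have h0 := cond_bridge int_List j hj '0'
    have h1 := cond_bridge int_List j hj '1'
    rw [← hseen] at h0 h1
    rw [Bool.eq_iff_iff.mpr h0, Bool.eq_iff_iff.mpr h1]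
  obtain ⟨s0, s1, s2, s3, s4, s5, hs6⟩ :
      ∃ s0 s1 s2 s3 s4 s5, seen = [s0, s1, s2, s3, s4, s5] := by
    match hm : seen, hlen with
    | [a0, a1, a2, a3, a4, a5], _ => exact ⟨a0, a1, a2, a3, a4, a5, rfl⟩
  have k0 := key 0 (by omega); have k1 := key 1 (by omega)
  have k2 := key 2 (by omega); have k3 := key 3 (by omega)
  have k4 := key 4 (by omega); have k5 := key 5 (by omega)
  rw [hs6] at k0 k1 k2 k3 k4 k5 ⊢
  simp only [List.getElem?_cons_zero, List.getElem?_cons_succ, Option.getD_some] at k0 k1 k2 k3 k4 k5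
  push_cast at k0 k1 k2 k3 k4 k5
  show aLoop (int_List.map integer_to_bin) [0, 1, 2, 3, 4, 5] = _
  simp only [aLoop, List.any_cons, List.any_nil, k0, k1, k2, k3, k4, k5]
  clear hseen hlen hlenc key hs6 k0 k1 k2 k3 k4 k5
  generalize (PySem.Set.issubset s0 ['0'] || PySem.Set.issubset s0 ['1']) = c0
  generalize (PySem.Set.issubset s1 ['0'] || PySem.Set.issubset s1 ['1']) = c1
  generalize (PySem.Set.issubset s2 ['0'] || PySem.Set.issubset s2 ['1']) = c2
  generalize (PySem.Set.issubset s3 ['0'] || PySem.Set.issubset s3 ['1']) = c3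
  generalize (PySem.Set.issubset s4 ['0'] || PySem.Set.issubset s4 ['1']) = c4
  generalize (PySem.Set.issubset s5 ['0'] || PySem.Set.issubset s5 ['1']) = c5
  cases c0 <;> cases c1 <;> cases c2 <;> cases c3 <;> cases c4 <;> cases c5 <;> rfl
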